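-- pv_equiv track=rewrite | github.com/r-log/github-code-reviewer | tests/fixtures/sample_files/bad_code.py | calculate_SOMETHING
-- ===== SOURCE A (Python) =====
-- def calculate_SOMETHING(inpt):
--     Output = []
--     # Nested loops with complex logic
--     for i in inpt:
--         for j in inpt:
--             if i > j:
--                 if i - j > 10:
--                     Output.append(i)
--     return Output
-- ===== SOURCE B (Python) =====
-- def calculate_SOMETHING(inpt):
--     s = sorted(inpt)
--     out = []
--     for i in inpt:
--         # binary search: number of elements of s (sorted) strictly below i - 10
--         lo, hi = 0, len(s)
--         while lo < hi:
--             mid = (lo + hi) // 2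
--             if s[mid] < i - 10:
--                 lo = mid + 1
--             else:
--                 hi = mid
--         out += [i] * lo
--     return out
-- ===== Notes on version B (the rewrite author's own statement) =====
-- stated objective: alternative
-- what changed: Replaces the quadratic nested scan with a sorted copy and a per-element binary search counting values below i-10, appending i that many times at once; counting is O(n log n) but the output itself can be quadratic in size, so overall cost is output-bound (measured ~2-3x faster constant, not confirmed at the largest size).
import Mathlib
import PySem

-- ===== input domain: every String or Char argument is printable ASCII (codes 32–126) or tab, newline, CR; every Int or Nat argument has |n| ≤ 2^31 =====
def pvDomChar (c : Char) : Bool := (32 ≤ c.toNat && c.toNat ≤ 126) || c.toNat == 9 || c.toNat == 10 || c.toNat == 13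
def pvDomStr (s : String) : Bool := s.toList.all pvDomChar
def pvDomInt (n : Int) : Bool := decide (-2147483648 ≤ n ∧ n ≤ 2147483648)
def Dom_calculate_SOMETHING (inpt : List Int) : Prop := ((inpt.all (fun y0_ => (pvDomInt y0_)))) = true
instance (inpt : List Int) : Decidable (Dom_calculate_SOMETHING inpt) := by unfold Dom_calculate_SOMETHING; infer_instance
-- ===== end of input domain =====

-- B replaces A's quadratic nested scan by a sorted copy plus one binary search per element, appending each i in one block (alternative algorithm; total cost is bounded below by the output size).

-- ===== PORT A =====
def calculate_SOMETHING (inpt : List Int) : List Int :=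
  inpt.foldl (fun O i =>
    inpt.foldl (fun O j =>
      if i > j then (if i - j > 10 then O ++ [i] else O) else O) O) []

-- ===== PORT B =====
-- Source B's hand-written while-loop binary search (lo, hi over s)
def blLoop (s : List Int) (x : Int) (lo hi : Nat) : Nat :=
  if lo < hi then
    let mid := (lo + hi) / 2
    if s.getD mid 0 < x then blLoop s x (mid + 1) hi else blLoop s x lo mid
  else lo
termination_by hi - lo
decreasing_by all_goals omega

def calculate_SOMETHING_alt (inpt : List Int) : List Int :=
  let s := PySem.List.sorted inpt (fun x => x) false
  inpt.foldl (fun out i =>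
    out ++ List.replicate (blLoop s (i - 10) 0 s.length) i) []

-- ===== PRECONDITION & SPEC =====
def Spec_calculate_SOMETHING (inpt : List Int) (out : List Int) : Prop := out = calculate_SOMETHING_alt inpt
instance (inpt : List Int) (out : List Int) : Decidable (Spec_calculate_SOMETHING inpt out) := by unfold Spec_calculate_SOMETHING; infer_instance

-- ===== CLAIM (what is proved, stated in full; the proofs are below) =====
def Claim_equal_calculate_SOMETHING : Prop := ∀ (inpt : List Int), Dom_calculate_SOMETHING inpt → Spec_calculate_SOMETHING inpt (calculate_SOMETHING inpt)

-- ===== LEMMAS AND PROOFS =====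

-- countP of a list all of whose first k positions satisfy p and the rest do not is k
theorem pv_countP_split (s : List Int) (p : Int → Bool) (k : Nat) (hk : k ≤ s.length)
    (h1 : ∀ (j : Nat) (hj : j < s.length), j < k → p s[j])
    (h2 : ∀ (j : Nat) (hj : j < s.length), k ≤ j → ¬ p s[j]) :
    s.countP p = k := by
  induction s generalizing k with
  | nil => simpa using hk.antisymm (Nat.zero_le k) |>.symm ▸ by simp [List.countP]
  | cons a t ih =>
    cases k with
    | zero =>
      have ha : ¬ p a := h2 0 (by simp) (Nat.le_refl 0)
      have : t.countP p = 0 := by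
        rw [List.countP_eq_zero]
        intro b hb
        obtain ⟨j, hj, rfl⟩ := List.mem_iff_getElem.1 hb
        exact h2 (j + 1) (by simpa using Nat.succ_lt_succ hj) (Nat.zero_le _)
      simp [List.countP_cons, ha, this]
    | succ k' =>
      have ha : p a := h1 0 (by simp) (Nat.succ_pos _)
      have ht : t.countP p = k' := by
        refine ih k' (by simpa using hk) ?_ ?_
        · intro j hj hjk
          exact h1 (j + 1) (by simpa using Nat.succ_lt_succ hj) (Nat.succ_lt_succ hjk)
        · intro j hj hjk
          exact h2 (j + 1) (by simpa using Nat.succ_lt_succ hj) (Nat.succ_le_succ hjk)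
      simp [List.countP_cons, ha, ht]

-- the binary-search loop computes, on a sorted list, the count of elements below x
theorem pv_blLoop_count (s : List Int) (x : Int) (hs : s.Pairwise (· ≤ ·)) :
    ∀ (n lo hi : Nat), hi - lo ≤ n → lo ≤ hi → hi ≤ s.length →
    (∀ (j : Nat) (hj : j < s.length), j < lo → s[j] < x) →
    (∀ (j : Nat) (hj : j < s.length), hi ≤ j → ¬ s[j] < x) →
    blLoop s x lo hi = s.countP (fun a => decide (a < x)) := by
  have hmono : ∀ (p q : Nat) (hp : p < s.length) (hq : q < s.length), p ≤ q → s[p] ≤ s[q] := by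
    intro p q hp hq hpq
    rcases Nat.lt_or_ge p q with h | h
    · exact (List.pairwise_iff_getElem.1 hs) p q hp hq h
    · have : p = q := Nat.le_antisymm hpq h
      subst this; exact le_refl _
  have base : ∀ (lo : Nat), lo ≤ s.length →
      (∀ (j : Nat) (hj : j < s.length), j < lo → s[j] < x) →
      (∀ (j : Nat) (hj : j < s.length), lo ≤ j → ¬ s[j] < x) →
      blLoop s x lo lo = s.countP (fun a => decide (a < x)) := by
    intro lo hlen hlow hhigh
    rw [blLoop]
    simp only [Nat.lt_irrefl, if_false]
    exact (pv_countP_split s _ lo hlen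
      (fun j hj hjk => by simpa using hlow j hj hjk)
      (fun j hj hjk => by simpa using hhigh j hj hjk)).symm
  intro n
  induction n with
  | zero =>
    intro lo hi hn hle hhi hlow hhigh
    have : lo = hi := by omega
    subst this
    exact base lo hhi hlow hhigh
  | succ n ih =>
    intro lo hi hn hle hhi hlow hhigh
    by_cases h : lo < hi
    · have hmidlt : (lo + hi) / 2 < hi := by omega
      have hmidge : lo ≤ (lo + hi) / 2 := by omega
      have hmlen : (lo + hi) / 2 < s.length := lt_of_lt_of_le hmidlt hhi
      have hget : s.getD ((lo + hi) / 2) 0 = s[(lo + hi) / 2] := List.getD_eq_getElem s 0 hmlen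
      rw [blLoop]
      simp only [h, if_true]
      by_cases hc : s.getD ((lo + hi) / 2) 0 < x
      · simp only [hc, if_true]
        refine ih ((lo + hi) / 2 + 1) hi (by omega) (by omega) hhi ?_ hhigh
        intro j hj hjlt
        rcases Nat.lt_or_ge j lo with h' | h'
        · exact hlow j hj h'
        · calc s[j] ≤ s[(lo + hi) / 2] := hmono j _ hj hmlen (by omega)
            _ < x := by rwa [hget] at hc
      · simp only [hc, if_false]
        refine ih lo ((lo + hi) / 2) (by omega) hmidge (le_of_lt hmlen) hlow ?_
        intro j hj hjge hlt
        have : s[(lo + hi) / 2] ≤ s[j] := hmono _ j hmlen hj hjge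
        rw [hget] at hc
        exact hc (lt_of_le_of_lt this hlt)
    · have : lo = hi := by omega
      subst this
      exact base lo hhi hlow hhigh

-- A's inner loop appends i once per element below i - 10
theorem pv_inner (i : Int) (l : List Int) : ∀ acc : List Int,
    l.foldl (fun O j => if i > j then (if i - j > 10 then O ++ [i] else O) else O) acc
      = acc ++ List.replicate (l.countP (fun j => decide (j < i - 10))) i := by
  induction l with
  | nil => intro acc; simp
  | cons j t ih =>
    intro acc
    by_cases hp : j < i - 10
    · have h1 : i > j := by omega
      have h2 : i - j > 10 := by omega
      simp only [List.foldl_cons, h1, h2, if_true, List.countP_cons, hp, decide_true]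
      rw [ih (acc ++ [i])]
      simp [List.replicate_succ, List.append_assoc]
    · have hstep : (if i > j then (if i - j > 10 then acc ++ [i] else acc) else acc) = acc := by
        split_ifs <;> first | rfl | omega
      simp only [List.foldl_cons, hstep, List.countP_cons, hp, decide_false]
      rw [ih acc]
      simp

-- B's per-element count equals A's: the binary search on the sorted copy counts elements of inpt below x
theorem pv_count_eq (inpt : List Int) (x : Int) :
    blLoop (PySem.List.sorted inpt (fun y => y) false) x 0
        (PySem.List.sorted inpt (fun y => y) false).length
      = inpt.countP (fun a => decide (a < x)) := by
  set s := PySem.List.sorted inpt (fun y => y) false with hsdef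
  have hs : s.Pairwise (· ≤ ·) := by
    have := PySem.List.sorted_pairwise (xs := inpt) (key := fun y => y)
    simpa [hsdef] using this
  have hperm : s.Perm inpt := PySem.List.sorted_perm inpt (fun y => y) false
  rw [pv_blLoop_count s x hs s.length 0 s.length (by omega) (Nat.zero_le _) (le_refl _)
      (fun j hj hjk => absurd hjk (Nat.not_lt_zero j))
      (fun j hj hjk => absurd hj (by omega))]
  exact hperm.countP_eq _

-- ===== VERDICT (by name: the statement is the Claim_ definition above) =====
theorem calculate_SOMETHING_spec : Claim_equal_calculate_SOMETHING := by
  intro inpt _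
  unfold Spec_calculate_SOMETHING calculate_SOMETHING calculate_SOMETHING_alt
  have hstep : (fun (O : List Int) (i : Int) =>
      inpt.foldl (fun O j => if i > j then (if i - j > 10 then O ++ [i] else O) else O) O)
    = (fun (out : List Int) (i : Int) =>
      out ++ List.replicate (blLoop (PySem.List.sorted inpt (fun x => x) false) (i - 10) 0
        (PySem.List.sorted inpt (fun x => x) false).length) i) := by
    funext O i
    rw [pv_inner i inpt O, pv_count_eq inpt (i - 10)]
  rw [hstep]
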